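-- pv_equiv track=rewrite | github.com/kferguson2/Term_Project | course_listings.py | course_level_list
-- ===== SOURCE A (Python) =====
-- def sort_by_course_level_num(course):
--     """
--     Function that returns the course level number
--
--     Example: course = ACC3500-01, returns 5
--     """
--     course_code = course[0]
--     course_level_num = course_code[4]
--     return course_level_num
--
-- def course_level_list(course_level, course_list):
--     """
--     Take a list of all courses being offered and the desired course level
--     Returns a list of courses that are available for the given course level
--
--     course_level (str): Advanced Liberal Arts Electives, Advanced Electives, or Free Electives
--     """
--     advanced_liberal_arts = []
--     advanced_electives = []
--     free_electives = []
--     for course_available in course_list: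
--         course_code = course_available[0]
--         course_level_num = course_code[4]
--         if course_level_num == '6':
--             advanced_liberal_arts.append(course_available)
--             advanced_electives.append(course_available)
--             free_electives.append(course_available)
--         elif course_level_num == '5':
--             advanced_electives.append(course_available)
--             free_electives.append(course_available)
--         elif course_level_num == '1' or course_level_num == '2':
--             free_electives.append(course_available)
--         else:
--             pass
--     if course_level == 'Advanced Liberal Arts Electives':
--         return advanced_liberal_arts
--     elif course_level == 'Advanced Electives':
--         advanced_electives_sorted = sorted(advanced_electives, key=sort_by_course_level_num)
--         return advanced_electives_sorted
--     else:
--         free_electives_sorted = sorted(free_electives, key=sort_by_course_level_num)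
--         return free_electives_sorted
-- ===== SOURCE B (Python) =====
-- def course_level_list(course_level, course_list):
--     """
--     Bucket version: branch on course_level first, then one filtered pass per
--     relevant level digit, concatenated in ascending key order (no sorted() call).
--     """
--     if course_level == 'Advanced Liberal Arts Electives':
--         return [c for c in course_list if c[0][4] == '6']
--     if course_level == 'Advanced Electives':
--         levels = ('5', '6')
--     else:
--         levels = ('1', '2', '5', '6')
--     result = []
--     for level in levels:
--         result.extend(c for c in course_list if c[0][4] == level)
--     return result
-- ===== Notes on version B (the rewrite author's own statement) =====
-- stated objective: simpler
-- what changed: Replaces the three-accumulator loop plus a comparison sort with a branch on course_level followed by one filtered pass per relevant level digit, concatenated in ascending key order (a bucket sort on the four possible keys), eliminating sorted() entirely.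
import Mathlib
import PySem

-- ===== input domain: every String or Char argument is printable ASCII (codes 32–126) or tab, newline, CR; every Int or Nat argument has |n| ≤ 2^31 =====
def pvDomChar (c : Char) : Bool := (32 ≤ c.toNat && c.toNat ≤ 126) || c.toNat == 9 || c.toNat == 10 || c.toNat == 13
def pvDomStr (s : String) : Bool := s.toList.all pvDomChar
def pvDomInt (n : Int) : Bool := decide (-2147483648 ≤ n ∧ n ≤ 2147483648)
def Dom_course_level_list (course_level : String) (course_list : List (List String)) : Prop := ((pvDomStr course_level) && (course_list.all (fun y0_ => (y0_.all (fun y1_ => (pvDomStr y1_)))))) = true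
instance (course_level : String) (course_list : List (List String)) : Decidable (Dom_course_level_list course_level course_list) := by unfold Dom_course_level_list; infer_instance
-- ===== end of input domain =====

-- B replaces A's three-accumulator loop + sorted() by a branch on course_level and
-- per-level filtered passes concatenated in ascending key order (bucket sort): simpler.

-- ===== PORT A =====
-- helper `sort_by_course_level_num`: course[0][4]; total via defaults, exact under
-- Pre_course_level_list (Python raises IndexError exactly where the `?` forms are none).
def sort_by_course_level_num (course : List String) : Char :=
  (PySem.Str.pyGet? (PySem.List.pyGetD course 0 "") 4).getD ' '

def course_level_list (course_level : String) (course_list : List (List String)) : List (List String) :=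
  -- the for-loop over course_list building the three accumulator lists
  let st := course_list.foldl
    (fun (st : List (List String) × List (List String) × List (List String)) course_available =>
      let course_code := PySem.List.pyGetD course_available 0 ""    -- course_available[0]; exact under Pre_
      let course_level_num := (PySem.Str.pyGet? course_code 4).getD ' '   -- course_code[4]; exact under Pre_
      if course_level_num = '6' then (st.1 ++ [course_available], st.2.1 ++ [course_available], st.2.2 ++ [course_available])
      else if course_level_num = '5' then (st.1, st.2.1 ++ [course_available], st.2.2 ++ [course_available])
      else if course_level_num = '1' ∨ course_level_num = '2' then (st.1, st.2.1, st.2.2 ++ [course_available])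
      else st)
    ([], [], [])
  if course_level = "Advanced Liberal Arts Electives" then st.1
  else if course_level = "Advanced Electives" then PySem.List.sorted st.2.1 sort_by_course_level_num
  else PySem.List.sorted st.2.2 sort_by_course_level_num

-- ===== PORT B =====
-- B's inline c[0][4] (total via defaults, exact under Pre_course_level_list)
def altNum (c : List String) : Char :=
  (PySem.Str.pyGet? (PySem.List.pyGetD c 0 "") 4).getD ' '

def course_level_list_alt (course_level : String) (course_list : List (List String)) : List (List String) :=
  if course_level = "Advanced Liberal Arts Electives" then
    course_list.filter (fun c => altNum c = '6')
  else
    let levels := if course_level = "Advanced Electives" then ['5', '6'] else ['1', '2', '5', '6']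
    levels.foldl (fun result level => result ++ course_list.filter (fun c => altNum c = level)) []

-- ===== PRECONDITION & SPEC =====
-- Pre_ excludes exactly the inputs where Python A raises IndexError: a course that is
-- the empty list (course_available[0]) or whose first entry is shorter than 5 characters.
def Pre_course_level_list (course_level : String) (course_list : List (List String)) : Prop :=
  ∀ c ∈ course_list, c ≠ [] ∧ 4 < (c.headD "").toList.length
instance (course_level : String) (course_list : List (List String)) : Decidable (Pre_course_level_list course_level course_list) := by unfold Pre_course_level_list; infer_instance

def pvWitness_course_level_list : String × List (List String) :=
  ("Advanced Electives", [["ACC3500-01"], ["MTH1600-01"], ["ENG2500-02"]])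

def Spec_course_level_list (course_level : String) (course_list : List (List String)) (out : List (List String)) : Prop := out = course_level_list_alt course_level course_list
instance (course_level : String) (course_list : List (List String)) (out : List (List String)) : Decidable (Spec_course_level_list course_level course_list out) := by unfold Spec_course_level_list; infer_instance

-- ===== CLAIM (what is proved, stated in full; the proofs are below) =====
def Claim_equal_course_level_list : Prop := ∀ (course_level : String) (course_list : List (List String)), Dom_course_level_list course_level course_list → Pre_course_level_list course_level course_list → Spec_course_level_list course_level course_list (course_level_list course_level course_list)

-- ===== LEMMAS AND PROOFS =====

-- A's loop characterised for an arbitrary key function: the three accumulators are filters.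
theorem loopA_gen (num : List String → Char) (xs : List (List String)) (a b f : List (List String)) :
    xs.foldl
      (fun (st : List (List String) × List (List String) × List (List String)) c =>
        if num c = '6' then (st.1 ++ [c], st.2.1 ++ [c], st.2.2 ++ [c])
        else if num c = '5' then (st.1, st.2.1 ++ [c], st.2.2 ++ [c])
        else if num c = '1' ∨ num c = '2' then (st.1, st.2.1, st.2.2 ++ [c])
        else st)
      (a, b, f)
    = (a ++ xs.filter (fun c => num c = '6'),
       b ++ xs.filter (fun c => num c = '6' ∨ num c = '5'),
       f ++ xs.filter (fun c => num c = '6' ∨ num c = '5' ∨ num c = '1' ∨ num c = '2')) := by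
  induction xs generalizing a b f with
  | nil => simp
  | cons x xs ih =>
    simp only [List.foldl_cons, List.filter_cons]
    by_cases h6 : num x = '6'
    · simp [h6, ih]
    · by_cases h5 : num x = '5'
      · simp [h5, ih]
      · by_cases h12 : num x = '1' ∨ num x = '2'
        · simp [h6, h5, h12, ih]
        · simp [h6, h5, h12, ih]

-- A's loop at the concrete key expression, stated in the port's let-form (defeq to loopA_gen)
theorem loopA (xs : List (List String)) (a b f : List (List String)) :
    xs.foldl
      (fun (st : List (List String) × List (List String) × List (List String)) c =>
        let cc := PySem.List.pyGetD c 0 ""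
        let n := (PySem.Str.pyGet? cc 4).getD ' '
        if n = '6' then (st.1 ++ [c], st.2.1 ++ [c], st.2.2 ++ [c])
        else if n = '5' then (st.1, st.2.1 ++ [c], st.2.2 ++ [c])
        else if n = '1' ∨ n = '2' then (st.1, st.2.1, st.2.2 ++ [c])
        else st)
      (a, b, f)
    = (a ++ xs.filter (fun c => altNum c = '6'),
       b ++ xs.filter (fun c => altNum c = '6' ∨ altNum c = '5'),
       f ++ xs.filter (fun c => altNum c = '6' ∨ altNum c = '5' ∨ altNum c = '1' ∨ altNum c = '2')) :=
  loopA_gen altNum xs a b f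

-- stable insertion skips a prefix it is not "before"
theorem insertBy_append_left {α : Type} (bf : α → α → Bool) (x : α) (A B : List α)
    (h : ∀ y ∈ A, bf x y = false) :
    PySem.List.insertBy bf x (A ++ B) = A ++ PySem.List.insertBy bf x B := by
  induction A with
  | nil => simp
  | cons a A ih =>
    simp only [List.cons_append, PySem.List.insertBy, h a (by simp), Bool.false_eq_true, if_false]
    rw [ih (fun y hy => h y (by simp [hy]))]

theorem insertBy_cons_of_before {α : Type} (bf : α → α → Bool) (x : α) (B : List α)
    (h : ∀ y ∈ B, bf x y = true) :
    PySem.List.insertBy bf x B = x :: B := by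
  cases B with
  | nil => rfl
  | cons b B => simp [PySem.List.insertBy, h b (by simp)]

-- buckets: concatenation of per-key filters, in key order
def buckets {α : Type} (key : α → Char) (ks : List Char) (xs : List α) : List α :=
  ks.flatMap (fun k => xs.filter (fun c => key c = k))

theorem insertBy_buckets {α : Type} (key : α → Char) (ks : List Char)
    (hks : ks.Pairwise (· < ·)) (xs : List α) (x : α)
    (hx : key x ∈ ks) :
    PySem.List.insertBy (fun a b => decide (key a < key b)) x (buckets key ks xs)
      = buckets key ks (xs ++ [x]) := by
  induction ks with
  | nil => simp at hx
  | cons k ks ih =>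
    have hklt : ∀ k' ∈ ks, k < k' := (List.pairwise_cons.mp hks).1
    simp only [buckets, List.flatMap_cons] at *
    by_cases hkx : key x = k
    · -- x lands at the end of the k-bucket; later buckets are unchanged
      rw [insertBy_append_left _ _ _ _ (by
          intro y hy
          have hy' := List.of_mem_filter hy
          simp only [decide_eq_true_eq] at hy'
          simp [hkx, hy'])]
      rw [insertBy_cons_of_before _ _ _ (by
          intro y hy
          simp only [List.mem_flatMap] at hy
          obtain ⟨k', hk', hy'⟩ := hy
          have hy'' := List.of_mem_filter hy'
          simp only [decide_eq_true_eq] at hy''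
          simp [hkx, hy'', hklt k' hk'])]
      have hnk : ∀ k' ∈ ks, ¬ (key x = k') := by
        intro k' hk' he
        exact absurd (hkx ▸ he ▸ hklt k' hk') (lt_irrefl _)
      rw [List.flatMap_congr (l := ks)
            (f := fun k' => (xs ++ [x]).filter (fun c => key c = k'))
            (g := fun k' => xs.filter (fun c => key c = k'))
            (by intro k' hk'; simp [List.filter_append, hnk k' hk'])]
      simp [List.filter_append, hkx]
    · -- x belongs to a later bucket
      have hx' : key x ∈ ks := by
        cases List.mem_cons.mp hx with
        | inl h => exact absurd h hkx
        | inr h => exact h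
      rw [insertBy_append_left _ _ _ _ (by
          intro y hy
          have hy' := List.of_mem_filter hy
          simp only [decide_eq_true_eq] at hy'
          simp only [hy', decide_eq_false_iff_not]
          exact fun hc => absurd hc (not_lt_of_gt (hklt _ hx')))]
      rw [ih (List.pairwise_cons.mp hks).2 hx']
      simp [List.filter_append, hkx]

theorem sorted_eq_buckets {α : Type} (key : α → Char) (ks : List Char)
    (hks : ks.Pairwise (· < ·)) (xs : List α)
    (hmem : ∀ c ∈ xs, key c ∈ ks) :
    PySem.List.sorted xs key = buckets key ks xs := by
  induction xs using List.reverseRecOn with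
  | nil => simp [PySem.List.sorted_eq_foldl_insertBy, buckets]
  | append_singleton xs x ih =>
    rw [PySem.List.sorted_eq_foldl_insertBy, List.foldl_append, List.foldl_cons, List.foldl_nil,
        ← PySem.List.sorted_eq_foldl_insertBy, ih (fun c hc => hmem c (by simp [hc])),
        insertBy_buckets key ks hks xs x (hmem x (by simp))]

-- a per-key filter of A's pre-filtered list is the per-key filter of the whole list
theorem filter_key_filter (p : List String → Bool) (k : Char) (xs : List (List String))
    (himp : ∀ c, altNum c = k → p c = true) :
    (xs.filter p).filter (fun c => altNum c = k) = xs.filter (fun c => altNum c = k) := by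
  rw [List.filter_filter]
  apply List.filter_congr
  intro c _
  by_cases hk : altNum c = k
  · simp [hk, himp c hk]
  · simp [hk]

-- ===== VERDICT (by name: the statement is the Claim_ definition above) =====
theorem course_level_list_spec : Claim_equal_course_level_list := by
  intro cl xs _ _
  unfold Spec_course_level_list course_level_list course_level_list_alt
  rw [loopA]
  have hkey : sort_by_course_level_num = altNum := rfl
  by_cases h1 : cl = "Advanced Liberal Arts Electives"
  · simp [h1]
  · by_cases h2 : cl = "Advanced Electives"
    · simp only [h2, if_true, List.nil_append, hkey]
      rw [sorted_eq_buckets altNum ['5', '6'] (by decide) _ (by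
          intro c hc
          have hc' := List.of_mem_filter hc
          simp only [decide_eq_true_eq] at hc'
          rcases hc' with h | h <;> simp [h])]
      rw [PySem.List.foldl_append_eq_flatMap]
      simp only [buckets, List.flatMap_cons, List.flatMap_nil, List.nil_append, List.append_nil]
      rw [filter_key_filter _ '5' xs (by intro c h; simp [h]),
          filter_key_filter _ '6' xs (by intro c h; simp [h])]
    · simp only [h1, h2, if_false, List.nil_append, hkey]
      rw [sorted_eq_buckets altNum ['1', '2', '5', '6'] (by decide) _ (by
          intro c hc
          have hc' := List.of_mem_filter hc
          simp only [decide_eq_true_eq] at hc'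
          rcases hc' with h | h | h | h <;> simp [h])]
      rw [PySem.List.foldl_append_eq_flatMap]
      simp only [buckets, List.flatMap_cons, List.flatMap_nil, List.nil_append, List.append_nil]
      rw [filter_key_filter _ '1' xs (by intro c h; simp [h]),
          filter_key_filter _ '2' xs (by intro c h; simp [h]),
          filter_key_filter _ '5' xs (by intro c h; simp [h]),
          filter_key_filter _ '6' xs (by intro c h; simp [h])]
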